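-- pv_equiv track=rewrite | github.com/philgineer/Problem_solving | Baekjoon/1174.py | solve
-- ===== SOURCE A (Python) =====
-- def solve(digit):
--     l = []
--     for i in range(10):
--         if digit < 2:
--             l.append(i)
--             continue
--         for j in range(i):
--             if digit < 3:
--                 l.append(int(f'{i}{j}'))
--                 continue
--             for k in range(j):
--                 if digit < 4:
--                     l.append(int(f'{i}{j}{k}'))
--                     continue
--                 for i2 in range(k):
--                     if digit < 5:
--                         l.append(int(f'{i}{j}{k}{i2}'))
--                         continue
--                     for j2 in range(i2):
--                         if digit < 6:
--                             l.append(int(f'{i}{j}{k}{i2}{j2}'))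
--                             continue
--                         for k2 in range(j2):
--                             if digit < 7:
--                                 l.append(int(f'{i}{j}{k}{i2}{j2}{k2}'))
--                                 continue
--                             for i3 in range(k2):
--                                 if digit < 8:
--                                     l.append(int(f'{i}{j}{k}{i2}{j2}{k2}{i3}'))
--                                     continue
--                                 for j3 in range(i3):
--                                     if digit < 9:
--                                         l.append(int(f'{i}{j}{k}{i2}{j2}{k2}{i3}{j3}'))
--                                         continue
--                                     for k3 in range(j3):
--                                         if digit < 10:
--                                             l.append(int(f'{i}{j}{k}{i2}{j2}{k2}{i3}{j3}{k3}'))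
--                                             continue
--                                         for i4 in range(k3):
--                                             if digit < 11:
--                                                 l.append(int(f'{i}{j}{k}{i2}{j2}{k2}{i3}{j3}{k3}{i4}'))
--     return l, len(l)
-- ===== SOURCE B (Python) =====
-- def solve(digit):
--     # Generate strictly-decreasing-digit numbers breadth-first by length
--     # instead of ten nested loops.
--     if digit < 2:
--         return list(range(10)), 10
--     cur = [(i, i) for i in range(10)]
--     for _ in range(min(digit, 11) - 1):
--         cur = [(v * 10 + d, d) for (v, last) in cur for d in range(last)]
--     l = [v for (v, _) in cur]
--     return l, len(l)
-- ===== Notes on version B (the rewrite author's own statement) =====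
-- stated objective: simpler
-- what changed: Replaces the ten hand-written nested loops with per-level digit checks and f-string int parsing by breadth-first generation: start from the single digits and repeatedly extend every number with a strictly smaller trailing digit, once per additional digit of the requested length.
import Mathlib
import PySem

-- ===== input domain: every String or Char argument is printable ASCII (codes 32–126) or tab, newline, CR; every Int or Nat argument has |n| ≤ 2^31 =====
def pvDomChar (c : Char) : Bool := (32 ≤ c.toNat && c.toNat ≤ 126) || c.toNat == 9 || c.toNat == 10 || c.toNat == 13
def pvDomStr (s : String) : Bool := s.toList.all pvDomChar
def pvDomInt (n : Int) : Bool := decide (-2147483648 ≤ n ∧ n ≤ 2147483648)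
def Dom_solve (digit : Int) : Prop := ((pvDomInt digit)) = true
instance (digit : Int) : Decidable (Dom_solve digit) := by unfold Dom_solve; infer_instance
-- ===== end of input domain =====

-- B replaces A's ten nested digit loops by breadth-first generation by length; return value proved equal.

-- ===== PORT A =====
-- int(f'{x1}…{xn}') : concatenate the decimal renderings and parse; exact since
-- each xi here is a digit 0..9, so int() always succeeds (.getD 0 is never used).
def catInt (xs : List Int) : Int :=
  (PySem.Int.ofStr? (String.join (xs.map PySem.Int.toStr))).getD 0

def solve (digit : Int) : List Int × Int :=
  let l := (PySem.List.pyRange 0 10 1).foldl (fun l i =>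
    if digit < 2 then l ++ [i] else
    (PySem.List.pyRange 0 i 1).foldl (fun l j =>
      if digit < 3 then l ++ [catInt [i, j]] else
      (PySem.List.pyRange 0 j 1).foldl (fun l k =>
        if digit < 4 then l ++ [catInt [i, j, k]] else
        (PySem.List.pyRange 0 k 1).foldl (fun l i2 =>
          if digit < 5 then l ++ [catInt [i, j, k, i2]] else
          (PySem.List.pyRange 0 i2 1).foldl (fun l j2 =>
            if digit < 6 then l ++ [catInt [i, j, k, i2, j2]] else
            (PySem.List.pyRange 0 j2 1).foldl (fun l k2 =>
              if digit < 7 then l ++ [catInt [i, j, k, i2, j2, k2]] else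
              (PySem.List.pyRange 0 k2 1).foldl (fun l i3 =>
                if digit < 8 then l ++ [catInt [i, j, k, i2, j2, k2, i3]] else
                (PySem.List.pyRange 0 i3 1).foldl (fun l j3 =>
                  if digit < 9 then l ++ [catInt [i, j, k, i2, j2, k2, i3, j3]] else
                  (PySem.List.pyRange 0 j3 1).foldl (fun l k3 =>
                    if digit < 10 then l ++ [catInt [i, j, k, i2, j2, k2, i3, j3, k3]] else
                    (PySem.List.pyRange 0 k3 1).foldl (fun l i4 =>
                      if digit < 11 then l ++ [catInt [i, j, k, i2, j2, k2, i3, j3, k3, i4]] else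
                      l) l) l) l) l) l) l) l) l) l) []
  (l, (l.length : Int))

-- ===== PORT B =====
def solve_alt (digit : Int) : List Int × Int :=
  if digit < 2 then (PySem.List.pyRange 0 10 1, 10)
  else
    let cur0 := (PySem.List.pyRange 0 10 1).map (fun i => (i, i))
    let cur := (PySem.List.pyRange 0 (min digit 11 - 1) 1).foldl
      (fun cur _ => cur.flatMap (fun p =>
        (PySem.List.pyRange 0 p.2 1).map (fun d => (p.1 * 10 + d, d)))) cur0
    (cur.map Prod.fst, (cur.length : Int))

-- ===== PRECONDITION & SPEC =====
def Spec_solve (digit : Int) (out : List Int × Int) : Prop := out = solve_alt digit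
instance (digit : Int) (out : List Int × Int) : Decidable (Spec_solve digit out) := by unfold Spec_solve; infer_instance

-- ===== CLAIM (what is proved, stated in full; the proofs are below) =====
def Claim_equal_solve : Prop := ∀ (digit : Int), Dom_solve digit → Spec_solve digit (solve digit)

-- ===== LEMMAS AND PROOFS =====

-- Both programs depend on digit only through the comparisons digit < 2, …, digit < 11
-- and min digit 11; bucket_congr transports each to a concrete representative.
theorem solve_congr (d c : Int)
    (h : ∀ m : Int, 2 ≤ m → m ≤ 11 → ((d < m) = (c < m))) :
    solve d = solve c := by
  unfold solve
  simp only [h 2 (by norm_num) (by norm_num), h 3 (by norm_num) (by norm_num),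
      h 4 (by norm_num) (by norm_num), h 5 (by norm_num) (by norm_num),
      h 6 (by norm_num) (by norm_num), h 7 (by norm_num) (by norm_num),
      h 8 (by norm_num) (by norm_num), h 9 (by norm_num) (by norm_num),
      h 10 (by norm_num) (by norm_num), h 11 (by norm_num) (by norm_num)]

theorem solve_alt_congr (d c : Int)
    (h2 : (d < 2) = (c < 2)) (hm : ¬ d < 2 → min d 11 = min c 11) :
    solve_alt d = solve_alt c := by
  unfold solve_alt
  by_cases hd : d < 2
  · simp only [if_pos hd, if_pos (h2 ▸ hd)]
  · simp only [if_neg hd, if_neg (fun hc => hd (h2 ▸ hc)), hm hd]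

theorem solve_spec_at (c : Int) (hc : solve c = solve_alt c)
    (d : Int) (h : ∀ m : Int, 2 ≤ m → m ≤ 11 → ((d < m) = (c < m)))
    (h2 : (d < 2) = (c < 2)) (hm : ¬ d < 2 → min d 11 = min c 11) :
    solve d = solve_alt d := by
  rw [solve_congr d c h, solve_alt_congr d c h2 hm, hc]

-- ===== VERDICT (by name: the statement is the Claim_ definition above) =====
set_option maxRecDepth 100000 in
set_option maxHeartbeats 2000000 in
theorem solve_spec : Claim_equal_solve := by
  intro d _
  show solve d = solve_alt d
  by_cases h2 : d < 2
  · exact solve_spec_at 1 (by decide) d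
      (fun m hm hm' => by simp only [eq_iff_iff]; omega)
      (by simp only [eq_iff_iff]; omega) (by intro hnd; omega)
  by_cases h3 : d < 3
  · exact solve_spec_at 2 (by decide) d
      (fun m hm hm' => by simp only [eq_iff_iff]; omega)
      (by simp only [eq_iff_iff]; omega) (by intro hnd; omega)
  by_cases h4 : d < 4
  · exact solve_spec_at 3 (by decide) d
      (fun m hm hm' => by simp only [eq_iff_iff]; omega)
      (by simp only [eq_iff_iff]; omega) (by intro hnd; omega)
  by_cases h5 : d < 5
  · exact solve_spec_at 4 (by decide) d
      (fun m hm hm' => by simp only [eq_iff_iff]; omega)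
      (by simp only [eq_iff_iff]; omega) (by intro hnd; omega)
  by_cases h6 : d < 6
  · exact solve_spec_at 5 (by decide) d
      (fun m hm hm' => by simp only [eq_iff_iff]; omega)
      (by simp only [eq_iff_iff]; omega) (by intro hnd; omega)
  by_cases h7 : d < 7
  · exact solve_spec_at 6 (by decide) d
      (fun m hm hm' => by simp only [eq_iff_iff]; omega)
      (by simp only [eq_iff_iff]; omega) (by intro hnd; omega)
  by_cases h8 : d < 8
  · exact solve_spec_at 7 (by decide) d
      (fun m hm hm' => by simp only [eq_iff_iff]; omega)
      (by simp only [eq_iff_iff]; omega) (by intro hnd; omega)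
  by_cases h9 : d < 9
  · exact solve_spec_at 8 (by decide) d
      (fun m hm hm' => by simp only [eq_iff_iff]; omega)
      (by simp only [eq_iff_iff]; omega) (by intro hnd; omega)
  by_cases h10 : d < 10
  · exact solve_spec_at 9 (by decide) d
      (fun m hm hm' => by simp only [eq_iff_iff]; omega)
      (by simp only [eq_iff_iff]; omega) (by intro hnd; omega)
  by_cases h11 : d < 11
  · exact solve_spec_at 10 (by decide) d
      (fun m hm hm' => by simp only [eq_iff_iff]; omega)
      (by simp only [eq_iff_iff]; omega) (by intro hnd; omega)
  exact solve_spec_at 11 (by decide) d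
      (fun m hm hm' => by simp only [eq_iff_iff]; omega)
      (by simp only [eq_iff_iff]; omega) (by intro hnd; omega)
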